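-- pv_equiv track=rewrite | github.com/nxp-imx/gtec-demo-framework | .Config/FslBuildGen/Util.py | __IsValidPackageName
-- ===== SOURCE A (Python) =====
-- def IsValidNameStartCharacter(ch: str) -> bool:
--     return ((ch >= 'a' and ch <= 'z') or (ch >= 'A' and ch <= 'Z'))
--
-- def IsValidNameCharacter(ch: str) -> bool:
--     return ((ch >= 'a' and ch <= 'z') or (ch >= 'A' and ch <= 'Z') or (ch >= '0' and ch <= '9') or (ch == '_'))
--
-- def __IsValidPackageName(name: str) -> bool:
--     isFirstCharInName = True
--     previousChar = ' '
--     for ch in name: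
--         if ch != '.':
--             if not isFirstCharInName:
--                 if not IsValidNameCharacter(ch):
--                     return False
--             else:
--                 if not IsValidNameStartCharacter(ch):
--                     return False
--                 isFirstCharInName = False
--         elif previousChar == '.':
--             return False
--         else:
--             isFirstCharInName = True
--         previousChar = ch
--     return True
-- ===== SOURCE B (Python) =====
-- def IsValidNameStartCharacter(ch: str) -> bool:
--     return ((ch >= 'a' and ch <= 'z') or (ch >= 'A' and ch <= 'Z'))
--
-- def IsValidNameCharacter(ch: str) -> bool:
--     return ((ch >= 'a' and ch <= 'z') or (ch >= 'A' and ch <= 'Z') or (ch >= '0' and ch <= '9') or (ch == '_'))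
--
-- def __IsValidPackageName(name: str) -> bool:
--     segments = name.split('.')
--     count = len(segments)
--     return all(
--         (i == 0 or i == count - 1) if seg == ''
--         else (IsValidNameStartCharacter(seg[0])
--               and all(IsValidNameCharacter(c) for c in seg[1:]))
--         for i, seg in enumerate(segments))
-- ===== Notes on version B (the rewrite author's own statement) =====
-- stated objective: idiomatic
-- what changed: Replaces A's single stateful character loop (first-char flag + previous-char tracking) with a split of the name into dot-separated segments and an all() over the enumerated segments: an empty segment is allowed only at the first or last position, a non-empty segment must start with a letter and continue with letters, digits or underscore.
import Mathlib
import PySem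

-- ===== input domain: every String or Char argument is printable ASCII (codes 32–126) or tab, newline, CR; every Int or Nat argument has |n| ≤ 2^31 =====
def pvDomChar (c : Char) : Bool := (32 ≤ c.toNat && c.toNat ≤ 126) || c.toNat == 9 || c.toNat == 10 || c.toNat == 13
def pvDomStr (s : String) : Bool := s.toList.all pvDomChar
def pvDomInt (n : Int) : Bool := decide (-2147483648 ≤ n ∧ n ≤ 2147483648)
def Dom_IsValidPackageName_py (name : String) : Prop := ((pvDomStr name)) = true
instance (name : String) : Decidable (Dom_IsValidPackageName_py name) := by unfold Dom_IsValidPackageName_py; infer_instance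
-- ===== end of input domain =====

-- ===== PORT A =====
-- B replaces A's single stateful character loop by a split-on-'.'-then-check-segments
-- decomposition; same return value, same O(n) cost (objective: idiomatic).
def IsValidNameStartCharacter_py (ch : Char) : Bool :=
  ('a' ≤ ch && ch ≤ 'z') || ('A' ≤ ch && ch ≤ 'Z')
def IsValidNameCharacter_py (ch : Char) : Bool :=
  ('a' ≤ ch && ch ≤ 'z') || ('A' ≤ ch && ch ≤ 'Z') || ('0' ≤ ch && ch ≤ '9') || (ch == '_')
def pvALoop : List Char → Bool → Char → Bool
  | [], _, _ => true
  | ch :: rest, isFirstCharInName, previousChar =>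
    if ch ≠ '.' then
      if ¬ isFirstCharInName then
        if ¬ IsValidNameCharacter_py ch then false else pvALoop rest isFirstCharInName ch
      else
        if ¬ IsValidNameStartCharacter_py ch then false else pvALoop rest false ch
    else if previousChar = '.' then false
    else pvALoop rest true ch
def IsValidPackageName_py (name : String) : Bool :=
  pvALoop name.toList true ' '


-- ===== PORT B =====
-- check of one non-empty segment: valid start character, then valid name characters
def pvSegCheck (seg : List Char) : Bool :=
  match seg with
  | [] => true
  | c :: rest => IsValidNameStartCharacter_py c && rest.all IsValidNameCharacter_py
def IsValidPackageName_py_alt (name : String) : Bool :=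
  (PySem.List.enumerate (name.toList.splitOn '.')).all (fun p =>
    if p.2 = [] then (p.1 == 0 || p.1 == ((name.toList.splitOn '.').length : Int) - 1)
    else pvSegCheck p.2)


-- ===== PRECONDITION & SPEC =====
def Spec_IsValidPackageName_py (name : String) (out : Bool) : Prop := out = IsValidPackageName_py_alt name
instance (name : String) (out : Bool) : Decidable (Spec_IsValidPackageName_py name out) := by unfold Spec_IsValidPackageName_py; infer_instance

-- ===== CLAIM (what is proved, stated in full; the proofs are below) =====
def Claim_equal_IsValidPackageName_py : Prop := ∀ (name : String), Dom_IsValidPackageName_py name → Spec_IsValidPackageName_py name (IsValidPackageName_py name)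

-- ===== LEMMAS AND PROOFS =====
-- segment checks used only by the proof: pvBTail for non-first segments (empty only if
-- last), pvBFirst for a whole segment list, pvBMid for a partially consumed segment
def pvBTail : List (List Char) → Bool
  | [] => true
  | [s] => s.isEmpty || pvSegCheck s
  | s :: rest => !s.isEmpty && (pvSegCheck s && pvBTail rest)
def pvBFirst : List (List Char) → Bool
  | [] => true
  | s :: rest => pvSegCheck s && pvBTail rest
def pvBMid : List (List Char) → Bool
  | [] => true
  | s :: rest => s.all IsValidNameCharacter_py && pvBTail rest

lemma splitOn_ne_nil (cs : List Char) : List.splitOn '.' cs ≠ [] := by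
  simp only [List.splitOn]; exact List.splitOnP_ne_nil _ cs
lemma splitOn_dot_cons (cs : List Char) :
    List.splitOn '.' ('.' :: cs) = [] :: List.splitOn '.' cs := by
  simp [List.splitOn, List.splitOnP_cons]
lemma splitOn_other_cons (c : Char) (cs : List Char) (h : c ≠ '.') :
    List.splitOn '.' (c :: cs) = (List.splitOn '.' cs).modifyHead (c :: ·) := by
  simp [List.splitOn, List.splitOnP_cons, h]

lemma pvBTail_cons_cons (c : Char) (h0 : List Char) (t : List (List Char)) :
    pvBTail ((c :: h0) :: t) = (pvSegCheck (c :: h0) && pvBTail t) := by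
  cases t with
  | nil => simp [pvBTail, pvSegCheck]
  | cons a b => simp [pvBTail]


lemma pvALoop_cons_start (c : Char) (cs : List Char) (prev : Char) (hc : c ≠ '.') :
    pvALoop (c :: cs) true prev =
      (if IsValidNameStartCharacter_py c then pvALoop cs false c else false) := by
  by_cases hs : IsValidNameStartCharacter_py c <;> simp [pvALoop, hc, hs]

lemma pvALoop_cons_mid (c : Char) (cs : List Char) (prev : Char) (hc : c ≠ '.') :
    pvALoop (c :: cs) false prev =
      (if IsValidNameCharacter_py c then pvALoop cs false c else false) := by
  by_cases hs : IsValidNameCharacter_py c <;> simp [pvALoop, hc, hs]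

lemma pvALoop_cons_dot (cs : List Char) (b : Bool) (prev : Char) :
    pvALoop ('.' :: cs) b prev = (if prev = '.' then false else pvALoop cs true '.') := by
  by_cases hp : prev = '.' <;> simp [pvALoop, hp]

lemma pvALoop_states (cs : List Char) :
    (∀ prev, prev ≠ '.' → pvALoop cs true prev = pvBFirst (List.splitOn '.' cs))
    ∧ pvALoop cs true '.' = pvBTail (List.splitOn '.' cs)
    ∧ (∀ prev, prev ≠ '.' → pvALoop cs false prev = pvBMid (List.splitOn '.' cs)) := by
  induction cs with
  | nil =>
    refine ⟨fun prev h => ?_, ?_, fun prev h => ?_⟩ <;>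
      simp [pvALoop, pvBFirst, pvBTail, pvBMid, pvSegCheck]
  | cons c cs ih =>
    obtain ⟨ih0, ih1, ih2⟩ := ih
    obtain ⟨h0, t, ht⟩ : ∃ h0 t, List.splitOn '.' cs = h0 :: t := by
      cases hsp : List.splitOn '.' cs with
      | nil => exact absurd hsp (splitOn_ne_nil cs)
      | cons a b => exact ⟨a, b, rfl⟩
    by_cases hc : c = '.'
    · subst hc
      refine ⟨fun prev hprev => ?_, ?_, fun prev hprev => ?_⟩
      · rw [pvALoop_cons_dot, if_neg hprev, ih1, splitOn_dot_cons, pvBFirst]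
        simp [pvSegCheck]
      · rw [pvALoop_cons_dot, if_pos rfl, splitOn_dot_cons, ht]
        simp [pvBTail]
      · rw [pvALoop_cons_dot, if_neg hprev, ih1, splitOn_dot_cons, pvBMid]
        simp
    · have hsplit : List.splitOn '.' (c :: cs) = (c :: h0) :: t := by
        rw [splitOn_other_cons c cs hc, ht]; rfl
      have hmid : (if IsValidNameCharacter_py c then pvALoop cs false c else false) =
          (IsValidNameCharacter_py c && (h0.all IsValidNameCharacter_py && pvBTail t)) := by
        by_cases hs : IsValidNameCharacter_py c
        · rw [if_pos hs, ih2 c hc, ht, pvBMid]; simp [hs]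
        · simp [hs]
      refine ⟨fun prev hprev => ?_, ?_, fun prev hprev => ?_⟩
      · rw [pvALoop_cons_start c cs prev hc, hsplit, pvBFirst]
        by_cases hs : IsValidNameStartCharacter_py c
        · rw [if_pos hs, ih2 c hc, ht, pvBMid]
          simp [pvSegCheck, hs]
        · simp [pvSegCheck, hs]
      · rw [pvALoop_cons_start c cs '.' hc, hsplit, pvBTail_cons_cons]
        by_cases hs : IsValidNameStartCharacter_py c
        · rw [if_pos hs, ih2 c hc, ht, pvBMid]
          simp [pvSegCheck, hs]
        · simp [pvSegCheck, hs]
      · rw [pvALoop_cons_mid c cs prev hc, hsplit, pvBMid]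
        rw [hmid]
        simp [Bool.and_assoc]

lemma enum_tail_eq (L : Int) (rest : List (List Char)) (s : Int) (hs : 0 < s)
    (hL : s + rest.length = L) :
    ((PySem.List.enumerate rest s).all (fun p =>
      if p.2 = [] then (p.1 == 0 || p.1 == L - 1) else pvSegCheck p.2)) = pvBTail rest := by
  induction rest generalizing s with
  | nil => simp [PySem.List.enumerate_nil, pvBTail]
  | cons seg rest ih =>
    rw [PySem.List.enumerate_cons, List.all_cons]
    by_cases hrest : rest = []
    · subst hrest
      simp only [List.length_cons, List.length_nil] at hL
      have hlast : s = L - 1 := by omega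
      by_cases hseg : seg = []
      · subst hseg
        simp [PySem.List.enumerate_nil, pvBTail, hlast]
      · simp [PySem.List.enumerate_nil, pvBTail, hseg]
    · obtain ⟨a, b, rfl⟩ : ∃ a b, rest = a :: b := by
        cases rest with
        | nil => exact absurd rfl hrest
        | cons a b => exact ⟨a, b, rfl⟩
      rw [ih (s + 1) (by omega) (by simp only [List.length_cons] at hL ⊢; push_cast at hL ⊢; omega)]
      by_cases hseg : seg = []
      · subst hseg
        have h1 : (s == (0:Int)) = false := by simp; omega
        have h2 : (s == L - 1) = false := by
          simp only [List.length_cons] at hL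
          simp; push_cast at hL; omega
        simp [h1, h2, pvBTail]
      · simp [hseg, pvBTail]

lemma alt_eq_bFirst (name : String) :
    IsValidPackageName_py_alt name = pvBFirst (List.splitOn '.' name.toList) := by
  unfold IsValidPackageName_py_alt
  obtain ⟨h0, t, ht⟩ : ∃ h0 t, List.splitOn '.' name.toList = h0 :: t := by
    cases hsp : List.splitOn '.' name.toList with
    | nil => exact absurd hsp (splitOn_ne_nil name.toList)
    | cons a b => exact ⟨a, b, rfl⟩
  rw [ht, PySem.List.enumerate_cons, List.all_cons,
    enum_tail_eq (((h0 :: t).length : Int)) t (0 + 1) (by omega) (by simp only [List.length_cons]; push_cast; ring), pvBFirst]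
  by_cases hseg : h0 = []
  · subst hseg; simp [pvSegCheck]
  · simp [hseg]


-- ===== VERDICT (by name: the statement is the Claim_ definition above) =====
theorem IsValidPackageName_py_spec : Claim_equal_IsValidPackageName_py := by
  intro name _
  unfold Spec_IsValidPackageName_py IsValidPackageName_py
  rw [alt_eq_bFirst]
  exact (pvALoop_states name.toList).1 ' ' (by decide)
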